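-- pv_equiv track=rewrite | github.com/bhagavansprasad/students | bhagavan/ds-problems/hkrk/11-Ways-to-give-a-check-M/sol-ways-to-give-a-check-English.py | get_top_left_positions
-- ===== SOURCE A (Python) =====
-- maxrows = 8
--
-- def get_top_left_positions(row, col):
-- 	tlist = []
-- 	while(1):
-- 		if (row > maxrows or col < 1):
-- 			break
--
-- 		tlist.append((row, col))
-- 		row = row + 1
-- 		col = col - 1
--
-- 	return tlist
-- ===== SOURCE B (Python) =====
-- maxrows = 8
--
-- def get_top_left_positions(row, col):
--     if row > maxrows or col < 1:
--         return []
--     # farthest reachable cell on the up-right diagonal (row + col is invariant)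
--     end_row = min(maxrows, row + col - 1)
--     end_col = col - (end_row - row)
--     tlist = []
--     r, c = end_row, end_col
--     while r >= row:          # walk backwards from the endpoint, no boundary test needed
--         tlist.append((r, c))
--         r -= 1
--         c += 1
--     tlist.reverse()          # result was built back-to-front
--     return tlist
-- ===== Notes on version B (the rewrite author's own statement) =====
-- stated objective: alternative
-- what changed: Instead of walking forward with a boundary check each step, B computes the diagonal's far endpoint in closed form (end_row = min(maxrows, row+col-1)), walks backwards from the endpoint to the start with no boundary test inside the loop, and reverses the back-to-front result.
import Mathlib
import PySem

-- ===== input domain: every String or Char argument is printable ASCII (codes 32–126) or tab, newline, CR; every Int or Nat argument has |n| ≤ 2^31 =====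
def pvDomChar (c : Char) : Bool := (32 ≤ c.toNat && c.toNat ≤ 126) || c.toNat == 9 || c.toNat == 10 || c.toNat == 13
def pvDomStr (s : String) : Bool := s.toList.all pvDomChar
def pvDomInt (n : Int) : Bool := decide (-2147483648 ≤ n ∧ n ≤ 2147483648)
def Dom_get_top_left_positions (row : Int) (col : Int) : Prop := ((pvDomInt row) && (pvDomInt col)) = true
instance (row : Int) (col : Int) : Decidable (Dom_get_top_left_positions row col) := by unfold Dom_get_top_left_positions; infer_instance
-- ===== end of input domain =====

-- B computes the diagonal's endpoint in closed form and walks backwards from it, prepending (objective: alternative).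

-- ===== PORT A =====
-- A's while(1) loop: break when row > 8 or col < 1, else append (row,col), row += 1, col -= 1.
def get_top_left_positions (row : Int) (col : Int) : List (Int × Int) :=
  if row > 8 ∨ col < 1 then []
  else (row, col) :: get_top_left_positions (row + 1) (col - 1)
termination_by (9 - row).toNat
decreasing_by omega

-- ===== PORT B =====
-- B's backward while loop: from (r,c) = endpoint down to row, appending; then reverse.
def pvGoB (row : Int) (r : Int) (c : Int) (acc : List (Int × Int)) : List (Int × Int) :=
  if r ≥ row then pvGoB row (r - 1) (c + 1) (acc ++ [(r, c)]) else acc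
termination_by (r - row + 1).toNat
decreasing_by omega

def get_top_left_positions_alt (row : Int) (col : Int) : List (Int × Int) :=
  if row > 8 ∨ col < 1 then []
  else
    let endRow := min 8 (row + col - 1)
    let endCol := col - (endRow - row)
    (pvGoB row endRow endCol []).reverse

-- ===== PRECONDITION & SPEC =====
def Spec_get_top_left_positions (row : Int) (col : Int) (out : List (Int × Int)) : Prop := out = get_top_left_positions_alt row col
instance (row : Int) (col : Int) (out : List (Int × Int)) : Decidable (Spec_get_top_left_positions row col out) := by unfold Spec_get_top_left_positions; infer_instance

-- ===== CLAIM (what is proved, stated in full; the proofs are below) =====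
def Claim_equal_get_top_left_positions : Prop := ∀ (row : Int) (col : Int), Dom_get_top_left_positions row col → Spec_get_top_left_positions row col (get_top_left_positions row col)

-- ===== LEMMAS AND PROOFS =====

-- B's backward loop appends the cells (r-i, c+i) for i = 0..n-1 after acc.
lemma pvGoB_spec (row : Int) : ∀ (n : ℕ) (r c : Int) (acc : List (Int × Int)),
    (r - row + 1).toNat = n →
    pvGoB row r c acc = acc ++ (List.range n).map (fun i : ℕ => ((r - (i : Int), c + (i : Int)) : Int × Int)) := by
  intro n
  induction n with
  | zero =>
    intro r c acc hn
    rw [pvGoB, if_neg (by omega)]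
    simp
  | succ m ih =>
    intro r c acc hn
    rw [pvGoB, if_pos (by omega)]
    rw [ih (r - 1) (c + 1) (acc ++ [(r, c)]) (by omega)]
    rw [List.range_succ_eq_map]
    simp only [List.map_cons, List.map_map, Nat.cast_zero, sub_zero, add_zero, List.append_assoc,
      List.singleton_append, List.append_cancel_left_eq, List.cons.injEq, true_and]
    apply List.map_congr_left
    intro k _
    simp only [Function.comp, Prod.mk.injEq]
    push_cast
    exact ⟨by ring, by ring⟩

-- A's forward loop produces the cells (row+i, col-i) for i = 0..m where m = min(8-row, col-1).
lemma getA_spec : ∀ (n : ℕ) (row col : Int),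
    (min (8 - row) (col - 1) + 1).toNat = n →
    get_top_left_positions row col = (List.range n).map (fun i : ℕ => ((row + (i : Int), col - (i : Int)) : Int × Int)) := by
  intro n
  induction n with
  | zero =>
    intro row col hn
    rw [get_top_left_positions, if_pos (by omega)]
    simp
  | succ m ih =>
    intro row col hn
    rw [get_top_left_positions, if_neg (by omega)]
    rw [ih (row + 1) (col - 1) (by omega)]
    rw [List.range_succ_eq_map]
    simp only [List.map_cons, List.map_map, Nat.cast_zero, add_zero, sub_zero, List.cons.injEq,
      true_and]
    apply List.map_congr_left
    intro k _
    simp only [Function.comp, Prod.mk.injEq]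
    exact ⟨by push_cast; ring, by push_cast; ring⟩

-- ===== VERDICT (by name: the statement is the Claim_ definition above) =====
theorem get_top_left_positions_spec : Claim_equal_get_top_left_positions := by
  intro row col _
  show get_top_left_positions row col = get_top_left_positions_alt row col
  by_cases h : row > 8 ∨ col < 1
  · rw [get_top_left_positions, if_pos h, get_top_left_positions_alt, if_pos h]
  · rw [not_or, not_lt, not_lt] at h
    rw [get_top_left_positions_alt, if_neg (by omega)]
    show get_top_left_positions row col
        = (pvGoB row (min 8 (row + col - 1)) (col - (min 8 (row + col - 1) - row)) []).reverse
    set endRow := min 8 (row + col - 1) with hE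
    set endCol := col - (endRow - row) with hC
    set n : ℕ := (endRow - row + 1).toNat with hn
    rw [pvGoB_spec row n endRow endCol [] rfl, List.nil_append]
    rw [getA_spec n row col (by omega)]
    apply List.ext_getElem
    · simp
    · intro j hj1 hj2
      simp only [List.length_reverse, List.length_map, List.length_range] at hj1 hj2
      simp only [List.getElem_reverse, List.getElem_map, List.getElem_range, List.length_map,
        List.length_range, Prod.mk.injEq]
      constructor <;> omega
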